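-- pv_equiv track=rewrite | github.com/kdcube/kdcube-ai-app | app/ai-app/services/kdcube-ai-app/kdcube_ai_app/apps/chat/sdk/streaming/streaming.py | _skip_after_marker
-- ===== SOURCE A (Python) =====
-- def _skip_after_marker(buf: str, i: int) -> int:
--     """
--     After a BEGIN marker, skip:
--       - any spaces/tabs
--       - up to TWO newline groups (\n or \r\n)
--       - trailing spaces/tabs after those newlines
--     Exactly what was requested; allows zero newlines too.
--     """
--     n = len(buf)
--     # spaces/tabs
--     while i < n and buf[i] in (" ", "\t"):
--         i += 1
--     # up to two newline groups
--     for _ in range(2):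
--         if i < n and buf[i] == "\r":
--             if i + 1 < n and buf[i + 1] == "\n":
--                 i += 2
--             else:
--                 i += 1
--             while i < n and buf[i] in (" ", "\t"):
--                 i += 1
--         elif i < n and buf[i] == "\n":
--             i += 1
--             while i < n and buf[i] in (" ", "\t"):
--                 i += 1
--         else:
--             break
--     return i
-- ===== SOURCE B (Python) =====
-- # table-driven finite automaton for the pattern [ \t]*((\r\n|\r|\n)[ \t]*){0,2}
-- # states: 0 = no newline group yet, 2 = one group, 4 = two groups (skipping
-- # trailing spaces/tabs); 1 / 3 = just consumed a CR of group one / two (a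
-- # following LF belongs to the same group).  The pattern's language is
-- # prefix-closed, so the longest match is found by advancing while a
-- # transition exists and stopping at the first character with none.
-- _T = {
--     (0, " "): 0, (0, "\t"): 0, (0, "\n"): 2, (0, "\r"): 1,
--     (1, " "): 2, (1, "\t"): 2, (1, "\n"): 2, (1, "\r"): 3,
--     (2, " "): 2, (2, "\t"): 2, (2, "\n"): 4, (2, "\r"): 3,
--     (3, " "): 4, (3, "\t"): 4, (3, "\n"): 4,
--     (4, " "): 4, (4, "\t"): 4,
-- }
--
-- def _skip_after_marker(buf: str, i: int) -> int:
--     n = len(buf)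
--     state = 0
--     while i < n:
--         nxt = _T.get((state, buf[i]))
--         if nxt is None:
--             break
--         state = nxt
--         i += 1
--     return i
-- ===== Notes on version B (the rewrite author's own statement) =====
-- stated objective: alternative
-- what changed: Replaces A's staged scan (space/tab loop, then a two-iteration for-loop with CR/LF branching, lookahead and nested trailing-whitespace loops) by a table-driven finite automaton: the whitespace pattern is compiled into a 5-state transition dictionary and one uniform loop advances while a (state, char) transition exists.
import Mathlib
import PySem

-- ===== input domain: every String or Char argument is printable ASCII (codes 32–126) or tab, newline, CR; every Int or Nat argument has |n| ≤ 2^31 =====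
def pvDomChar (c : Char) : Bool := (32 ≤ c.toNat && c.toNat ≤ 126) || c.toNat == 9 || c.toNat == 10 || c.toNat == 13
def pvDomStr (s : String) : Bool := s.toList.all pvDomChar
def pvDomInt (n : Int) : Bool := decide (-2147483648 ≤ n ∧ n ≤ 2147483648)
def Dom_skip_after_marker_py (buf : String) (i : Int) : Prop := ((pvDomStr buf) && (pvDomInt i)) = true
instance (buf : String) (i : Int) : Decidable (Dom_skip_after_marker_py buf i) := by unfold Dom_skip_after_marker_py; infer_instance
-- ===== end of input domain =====

-- B replaces A's staged scan by a table-driven finite automaton: the whitespace pattern is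
-- compiled into a 5-state transition dictionary and one uniform loop follows it (objective:
-- alternative; same cost).

-- ===== PORT A =====
-- A's 'while i < n and buf[i] in (" ", "\t"): i += 1' (pyGet? = none, i.e. Python's
-- IndexError, is outside Pre_; the guard then reads false here)
def pvAWs (buf : String) (n i : Int) : Int :=
  if h : i < n ∧ (PySem.Str.pyGet? buf i = some ' ' ∨ PySem.Str.pyGet? buf i = some '\t') then
    pvAWs buf n (i + 1)
  else i
termination_by (n - i).toNat
decreasing_by omega

-- one iteration of A's 'for _ in range(2)' body; none = the final 'break'
def pvAGroup (buf : String) (n i : Int) : Option Int :=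
  if i < n ∧ PySem.Str.pyGet? buf i = some '\r' then
    some (pvAWs buf n
      (if i + 1 < n ∧ PySem.Str.pyGet? buf (i + 1) = some '\n' then i + 2 else i + 1))
  else if i < n ∧ PySem.Str.pyGet? buf i = some '\n' then
    some (pvAWs buf n (i + 1))
  else none

def skip_after_marker_py (buf : String) (i : Int) : Int :=
  let n : Int := PySem.Str.len buf
  let i1 := pvAWs buf n i
  match pvAGroup buf n i1 with
  | none => i1
  | some i2 =>
    match pvAGroup buf n i2 with
    | none => i2
    | some i3 => i3

-- ===== PORT B =====
-- B's transition table _T (a dict literal with distinct keys): states 0/2/4 = zero/one/two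
-- newline groups consumed (skipping spaces/tabs), 1/3 = just consumed the CR of group one/two.
def pvTable : PySem.Dict (Int × Char) Int :=
  PySem.Dict.mk
    [((0, ' '), 0), ((0, '\t'), 0), ((0, '\n'), 2), ((0, '\r'), 1),
     ((1, ' '), 2), ((1, '\t'), 2), ((1, '\n'), 2), ((1, '\r'), 3),
     ((2, ' '), 2), ((2, '\t'), 2), ((2, '\n'), 4), ((2, '\r'), 3),
     ((3, ' '), 4), ((3, '\t'), 4), ((3, '\n'), 4),
     ((4, ' '), 4), ((4, '\t'), 4)]

-- B's 'while i < n: …' automaton loop; pyGet? = none (Python's IndexError, outside Pre_)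
-- stops the loop here.
def pvBLoop (buf : String) (n i st : Int) : Int :=
  if _h : i < n then
    match PySem.Str.pyGet? buf i with
    | none => i
    | some c =>
      match PySem.Dict.get? pvTable (st, c) with
      | none => i
      | some st' => pvBLoop buf n (i + 1) st'
  else i
termination_by (n - i).toNat
decreasing_by omega

def skip_after_marker_py_alt (buf : String) (i : Int) : Int :=
  pvBLoop buf (PySem.Str.len buf) i 0

-- ===== PRECONDITION & SPEC =====
-- Pre_ excludes exactly the inputs on which the Python A raises IndexError:
-- i < -len(buf) together with i < len(buf) (B raises there too).
def Pre_skip_after_marker_py (buf : String) (i : Int) : Prop :=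
  -(PySem.Str.len buf) ≤ i ∨ PySem.Str.len buf ≤ i
instance (buf : String) (i : Int) : Decidable (Pre_skip_after_marker_py buf i) := by
  unfold Pre_skip_after_marker_py; infer_instance

def pvWitness_skip_after_marker_py : String × Int := (" \n\t\nx", 0)

def Spec_skip_after_marker_py (buf : String) (i : Int) (out : Int) : Prop := out = skip_after_marker_py_alt buf i
instance (buf : String) (i : Int) (out : Int) : Decidable (Spec_skip_after_marker_py buf i out) := by unfold Spec_skip_after_marker_py; infer_instance

-- ===== CLAIM (what is proved, stated in full; the proofs are below) =====
def Claim_equal_skip_after_marker_py : Prop := ∀ (buf : String) (i : Int), Dom_skip_after_marker_py buf i → Pre_skip_after_marker_py buf i → Spec_skip_after_marker_py buf i (skip_after_marker_py buf i)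

-- ===== LEMMAS AND PROOFS =====

-- evaluations of the transition table at each state
theorem pvTbl0 (c : Char) : PySem.Dict.get? pvTable (0, c) =
    if c = ' ' ∨ c = '\t' then some 0
    else if c = '\n' then some 2 else if c = '\r' then some 1 else none := by
  by_cases h1 : c = ' '; · subst h1; decide
  by_cases h2 : c = '\t'; · subst h2; decide
  by_cases h3 : c = '\n'; · subst h3; decide
  by_cases h4 : c = '\r'; · subst h4; decide
  simp [pvTable, h1, h2, h3, h4, PySem.Dict.get?]
  refine ⟨Ne.symm h1, Ne.symm h2, Ne.symm h3, Ne.symm h4⟩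

theorem pvTbl1 (c : Char) : PySem.Dict.get? pvTable (1, c) =
    if c = ' ' ∨ c = '\t' ∨ c = '\n' then some 2
    else if c = '\r' then some 3 else none := by
  by_cases h1 : c = ' '; · subst h1; decide
  by_cases h2 : c = '\t'; · subst h2; decide
  by_cases h3 : c = '\n'; · subst h3; decide
  by_cases h4 : c = '\r'; · subst h4; decide
  simp [pvTable, h1, h2, h3, h4, PySem.Dict.get?]
  refine ⟨Ne.symm h1, Ne.symm h2, Ne.symm h3, Ne.symm h4⟩

theorem pvTbl2 (c : Char) : PySem.Dict.get? pvTable (2, c) =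
    if c = ' ' ∨ c = '\t' then some 2
    else if c = '\n' then some 4 else if c = '\r' then some 3 else none := by
  by_cases h1 : c = ' '; · subst h1; decide
  by_cases h2 : c = '\t'; · subst h2; decide
  by_cases h3 : c = '\n'; · subst h3; decide
  by_cases h4 : c = '\r'; · subst h4; decide
  simp [pvTable, h1, h2, h3, h4, PySem.Dict.get?]
  refine ⟨Ne.symm h1, Ne.symm h2, Ne.symm h3, Ne.symm h4⟩

theorem pvTbl3 (c : Char) : PySem.Dict.get? pvTable (3, c) =
    if c = ' ' ∨ c = '\t' ∨ c = '\n' then some 4 else none := by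
  by_cases h1 : c = ' '; · subst h1; decide
  by_cases h2 : c = '\t'; · subst h2; decide
  by_cases h3 : c = '\n'; · subst h3; decide
  simp [pvTable, h1, h2, h3, PySem.Dict.get?]
  constructor
  · exact Ne.symm h1
  constructor
  · exact Ne.symm h2
  intro h
  exact h3 h.symm

theorem pvTbl4 (c : Char) : PySem.Dict.get? pvTable (4, c) =
    if c = ' ' ∨ c = '\t' then some 4 else none := by
  by_cases h1 : c = ' '; · subst h1; decide
  by_cases h2 : c = '\t'; · subst h2; decide
  simp [pvTable, h1, h2, PySem.Dict.get?]
  constructor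
  · exact Ne.symm h1
  intro h
  exact h2 h.symm


theorem pvBLoop_step_some (buf : String) (n i st st' : Int) (c : Char)
    (hn : i < n) (hc : PySem.Str.pyGet? buf i = some c)
    (ht : PySem.Dict.get? pvTable (st, c) = some st') :
    pvBLoop buf n i st = pvBLoop buf n (i + 1) st' := by
  conv_lhs => rw [pvBLoop]
  rw [dif_pos hn, hc]
  dsimp only
  rw [ht]

theorem pvBLoop_step_none (buf : String) (n i st : Int) (c : Char)
    (hn : i < n) (hc : PySem.Str.pyGet? buf i = some c)
    (ht : PySem.Dict.get? pvTable (st, c) = none) :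
    pvBLoop buf n i st = i := by
  conv_lhs => rw [pvBLoop]
  rw [dif_pos hn, hc]
  dsimp only
  rw [ht]

theorem pvBLoop_stop (buf : String) (n i st : Int)
    (hn : i < n) (hc : PySem.Str.pyGet? buf i = none) :
    pvBLoop buf n i st = i := by
  conv_lhs => rw [pvBLoop]
  rw [dif_pos hn, hc]

theorem pvAWs_fix (buf : String) (n i : Int) :
    ¬ (pvAWs buf n i < n ∧ (PySem.Str.pyGet? buf (pvAWs buf n i) = some ' ' ∨
        PySem.Str.pyGet? buf (pvAWs buf n i) = some '\t')) := by
  fun_induction pvAWs buf n i with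
  | case1 i h ih => exact ih
  | case2 i h => exact h

theorem pvAWs_idem (buf : String) (n i : Int) :
    pvAWs buf n (pvAWs buf n i) = pvAWs buf n i := by
  conv_lhs => rw [pvAWs]
  rw [dif_neg (pvAWs_fix buf n i)]

-- states with a space/tab self-loop absorb A's whitespace scan
theorem pvBLoop_ws (buf : String) (n i st : Int)
    (hsp : PySem.Dict.get? pvTable (st, ' ') = some st)
    (htb : PySem.Dict.get? pvTable (st, '\t') = some st) :
    pvBLoop buf n i st = pvBLoop buf n (pvAWs buf n i) st := by
  fun_induction pvAWs buf n i with
  | case1 i h ih =>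
    rcases h.2 with hc | hc
    · rw [pvBLoop_step_some buf n i st st ' ' h.1 hc hsp]; exact ih
    · rw [pvBLoop_step_some buf n i st st '\t' h.1 hc htb]; exact ih
  | case2 i h => rfl

-- state 4 (both newline groups consumed) is exactly A's final whitespace scan
theorem pvBLoop_4 (buf : String) (n i : Int) :
    pvBLoop buf n i 4 = pvAWs buf n i := by
  fun_induction pvAWs buf n i with
  | case1 i h ih =>
    rcases h.2 with hc | hc
    · rw [pvBLoop_step_some buf n i 4 4 ' ' h.1 hc (by decide)]; exact ih
    · rw [pvBLoop_step_some buf n i 4 4 '\t' h.1 hc (by decide)]; exact ih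
  | case2 i h =>
    by_cases hn : i < n
    · cases hc : PySem.Str.pyGet? buf i with
      | none => exact pvBLoop_stop buf n i 4 hn hc
      | some c =>
        have h1 : ¬ (c = ' ' ∨ c = '\t') := fun hcc => h ⟨hn, by
          rcases hcc with rfl | rfl
          · exact Or.inl hc
          · exact Or.inr hc⟩
        exact pvBLoop_step_none buf n i 4 c hn hc (by rw [pvTbl4, if_neg h1])
    · rw [pvBLoop, dif_neg hn]

-- a CR state at position i behaves like the next whitespace state, after an
-- optional LF that completes the CRLF pair
theorem pvBLoop_C1 (buf : String) (n i : Int) :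
    pvBLoop buf n i 1 =
      if i < n ∧ PySem.Str.pyGet? buf i = some '\n' then pvBLoop buf n (i + 1) 2
      else pvBLoop buf n i 2 := by
  by_cases hn : i < n
  · cases hc : PySem.Str.pyGet? buf i with
    | none =>
      rw [if_neg (by rintro ⟨-, h'⟩; cases h'),
        pvBLoop_stop buf n i 1 hn hc, pvBLoop_stop buf n i 2 hn hc]
    | some c =>
      by_cases hl : c = '\n'
      · subst hl
        rw [if_pos ⟨hn, rfl⟩, pvBLoop_step_some buf n i 1 2 '\n' hn hc (by decide)]
      · rw [if_neg (by rintro ⟨-, h'⟩; injection h' with h''; exact hl h'')]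
        by_cases hsp : c = ' '
        · subst hsp
          rw [pvBLoop_step_some buf n i 1 2 ' ' hn hc (by decide),
            pvBLoop_step_some buf n i 2 2 ' ' hn hc (by decide)]
        · by_cases htb : c = '\t'
          · subst htb
            rw [pvBLoop_step_some buf n i 1 2 '\t' hn hc (by decide),
              pvBLoop_step_some buf n i 2 2 '\t' hn hc (by decide)]
          · by_cases hr : c = '\r'
            · subst hr
              rw [pvBLoop_step_some buf n i 1 3 '\r' hn hc (by decide),
                pvBLoop_step_some buf n i 2 3 '\r' hn hc (by decide)]
            · rw [pvBLoop_step_none buf n i 1 c hn hc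
                  (by rw [pvTbl1]; simp [hsp, htb, hl, hr]),
                pvBLoop_step_none buf n i 2 c hn hc
                  (by rw [pvTbl2]; simp [hsp, htb, hl, hr])]
  · rw [if_neg (fun h' => hn h'.1)]
    conv_lhs => rw [pvBLoop, dif_neg hn]
    rw [pvBLoop, dif_neg hn]

theorem pvBLoop_C3 (buf : String) (n i : Int) :
    pvBLoop buf n i 3 =
      if i < n ∧ PySem.Str.pyGet? buf i = some '\n' then pvBLoop buf n (i + 1) 4
      else pvBLoop buf n i 4 := by
  by_cases hn : i < n
  · cases hc : PySem.Str.pyGet? buf i with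
    | none =>
      rw [if_neg (by rintro ⟨-, h'⟩; cases h'),
        pvBLoop_stop buf n i 3 hn hc, pvBLoop_stop buf n i 4 hn hc]
    | some c =>
      by_cases hl : c = '\n'
      · subst hl
        rw [if_pos ⟨hn, rfl⟩, pvBLoop_step_some buf n i 3 4 '\n' hn hc (by decide)]
      · rw [if_neg (by rintro ⟨-, h'⟩; injection h' with h''; exact hl h'')]
        by_cases hsp : c = ' '
        · subst hsp
          rw [pvBLoop_step_some buf n i 3 4 ' ' hn hc (by decide),
            pvBLoop_step_some buf n i 4 4 ' ' hn hc (by decide)]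
        · by_cases htb : c = '\t'
          · subst htb
            rw [pvBLoop_step_some buf n i 3 4 '\t' hn hc (by decide),
              pvBLoop_step_some buf n i 4 4 '\t' hn hc (by decide)]
          · rw [pvBLoop_step_none buf n i 3 c hn hc
                (by rw [pvTbl3]; simp [hsp, htb, hl]),
              pvBLoop_step_none buf n i 4 c hn hc
                (by rw [pvTbl4]; simp [hsp, htb])]
  · rw [if_neg (fun h' => hn h'.1)]
    conv_lhs => rw [pvBLoop, dif_neg hn]
    rw [pvBLoop, dif_neg hn]

-- running the automaton from state 0 (resp. 2) = A's whitespace scan, then one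
-- newline group if present, then the automaton from state 2 (resp. 4)
theorem pvBLoop_S0 (buf : String) (n i : Int) :
    pvBLoop buf n i 0 =
      match pvAGroup buf n (pvAWs buf n i) with
      | none => pvAWs buf n i
      | some k => pvBLoop buf n k 2 := by
  fun_induction pvAWs buf n i with
  | case1 i h ih =>
    rcases h.2 with hc | hc
    · rw [pvBLoop_step_some buf n i 0 0 ' ' h.1 hc (by decide)]; exact ih
    · rw [pvBLoop_step_some buf n i 0 0 '\t' h.1 hc (by decide)]; exact ih
  | case2 i h =>
    by_cases hn : i < n
    · cases hc : PySem.Str.pyGet? buf i with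
      | none =>
        have hA : ¬(i < n ∧ PySem.Str.pyGet? buf i = some '\r') := by
          rintro ⟨-, h'⟩; rw [hc] at h'; cases h'
        have hB : ¬(i < n ∧ PySem.Str.pyGet? buf i = some '\n') := by
          rintro ⟨-, h'⟩; rw [hc] at h'; cases h'
        rw [pvAGroup, if_neg hA, if_neg hB]
        exact pvBLoop_stop buf n i 0 hn hc
      | some c =>
        have h1 : ¬ (c = ' ' ∨ c = '\t') := fun hcc => h ⟨hn, by
          rcases hcc with rfl | rfl
          · exact Or.inl hc
          · exact Or.inr hc⟩
        by_cases hr : c = '\r'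
        · subst hr
          rw [pvAGroup, if_pos ⟨hn, hc⟩]
          dsimp only
          rw [← pvBLoop_ws buf n _ 2 (by decide) (by decide),
            pvBLoop_step_some buf n i 0 1 '\r' hn hc (by decide), pvBLoop_C1,
            show i + 1 + 1 = i + 2 from by ring]
          split_ifs <;> rfl
        · by_cases hl : c = '\n'
          · subst hl
            have hA : ¬(i < n ∧ PySem.Str.pyGet? buf i = some '\r') := by
              rintro ⟨-, h'⟩; rw [hc] at h'; exact hr (Option.some.inj h')
            rw [pvAGroup, if_neg hA, if_pos ⟨hn, hc⟩]
            dsimp only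
            rw [← pvBLoop_ws buf n _ 2 (by decide) (by decide),
              pvBLoop_step_some buf n i 0 2 '\n' hn hc (by decide)]
          · have hA : ¬(i < n ∧ PySem.Str.pyGet? buf i = some '\r') := by
              rintro ⟨-, h'⟩; rw [hc] at h'; exact hr (Option.some.inj h')
            have hB : ¬(i < n ∧ PySem.Str.pyGet? buf i = some '\n') := by
              rintro ⟨-, h'⟩; rw [hc] at h'; exact hl (Option.some.inj h')
            rw [pvAGroup, if_neg hA, if_neg hB]
            exact pvBLoop_step_none buf n i 0 c hn hc
              (by rw [pvTbl0]; simp [h1, hl, hr])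
    · have hA : ¬(i < n ∧ PySem.Str.pyGet? buf i = some '\r') := fun h' => hn h'.1
      have hB : ¬(i < n ∧ PySem.Str.pyGet? buf i = some '\n') := fun h' => hn h'.1
      rw [pvAGroup, if_neg hA, if_neg hB]
      rw [pvBLoop, dif_neg hn]

theorem pvBLoop_S2 (buf : String) (n i : Int) :
    pvBLoop buf n i 2 =
      match pvAGroup buf n (pvAWs buf n i) with
      | none => pvAWs buf n i
      | some k => pvBLoop buf n k 4 := by
  fun_induction pvAWs buf n i with
  | case1 i h ih =>
    rcases h.2 with hc | hc
    · rw [pvBLoop_step_some buf n i 2 2 ' ' h.1 hc (by decide)]; exact ih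
    · rw [pvBLoop_step_some buf n i 2 2 '\t' h.1 hc (by decide)]; exact ih
  | case2 i h =>
    by_cases hn : i < n
    · cases hc : PySem.Str.pyGet? buf i with
      | none =>
        have hA : ¬(i < n ∧ PySem.Str.pyGet? buf i = some '\r') := by
          rintro ⟨-, h'⟩; rw [hc] at h'; cases h'
        have hB : ¬(i < n ∧ PySem.Str.pyGet? buf i = some '\n') := by
          rintro ⟨-, h'⟩; rw [hc] at h'; cases h'
        rw [pvAGroup, if_neg hA, if_neg hB]
        exact pvBLoop_stop buf n i 2 hn hc
      | some c =>
        have h1 : ¬ (c = ' ' ∨ c = '\t') := fun hcc => h ⟨hn, by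
          rcases hcc with rfl | rfl
          · exact Or.inl hc
          · exact Or.inr hc⟩
        by_cases hr : c = '\r'
        · subst hr
          rw [pvAGroup, if_pos ⟨hn, hc⟩]
          dsimp only
          rw [← pvBLoop_ws buf n _ 4 (by decide) (by decide),
            pvBLoop_step_some buf n i 2 3 '\r' hn hc (by decide), pvBLoop_C3,
            show i + 1 + 1 = i + 2 from by ring]
          split_ifs <;> rfl
        · by_cases hl : c = '\n'
          · subst hl
            have hA : ¬(i < n ∧ PySem.Str.pyGet? buf i = some '\r') := by
              rintro ⟨-, h'⟩; rw [hc] at h'; exact hr (Option.some.inj h')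
            rw [pvAGroup, if_neg hA, if_pos ⟨hn, hc⟩]
            dsimp only
            rw [← pvBLoop_ws buf n _ 4 (by decide) (by decide),
              pvBLoop_step_some buf n i 2 4 '\n' hn hc (by decide)]
          · have hA : ¬(i < n ∧ PySem.Str.pyGet? buf i = some '\r') := by
              rintro ⟨-, h'⟩; rw [hc] at h'; exact hr (Option.some.inj h')
            have hB : ¬(i < n ∧ PySem.Str.pyGet? buf i = some '\n') := by
              rintro ⟨-, h'⟩; rw [hc] at h'; exact hl (Option.some.inj h')
            rw [pvAGroup, if_neg hA, if_neg hB]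
            exact pvBLoop_step_none buf n i 2 c hn hc
              (by rw [pvTbl2]; simp [h1, hl, hr])
    · have hA : ¬(i < n ∧ PySem.Str.pyGet? buf i = some '\r') := fun h' => hn h'.1
      have hB : ¬(i < n ∧ PySem.Str.pyGet? buf i = some '\n') := fun h' => hn h'.1
      rw [pvAGroup, if_neg hA, if_neg hB]
      rw [pvBLoop, dif_neg hn]

theorem pvAGroup_ws (buf : String) (n i k : Int) (h : pvAGroup buf n i = some k) :
    pvAWs buf n k = k := by
  unfold pvAGroup at h
  split_ifs at h with h1 h2 <;> simp only [Option.some.injEq] at h <;>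
    rw [← h, pvAWs_idem]

-- the two ports agree on every input (the proof needs no precondition)
theorem skip_eq (buf : String) (i : Int) :
    skip_after_marker_py buf i = skip_after_marker_py_alt buf i := by
  unfold skip_after_marker_py skip_after_marker_py_alt
  show (match pvAGroup buf (PySem.Str.len buf) (pvAWs buf (PySem.Str.len buf) i) with
        | none => pvAWs buf (PySem.Str.len buf) i
        | some i2 =>
          match pvAGroup buf (PySem.Str.len buf) i2 with
          | none => i2
          | some i3 => i3) = _
  rw [pvBLoop_S0]
  cases h1 : pvAGroup buf (PySem.Str.len buf) (pvAWs buf (PySem.Str.len buf) i) with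
  | none => rfl
  | some i2 =>
    dsimp only
    rw [pvBLoop_S2, pvAGroup_ws buf _ _ i2 h1]
    cases h2 : pvAGroup buf (PySem.Str.len buf) i2 with
    | none => rfl
    | some i3 =>
      dsimp only
      rw [pvBLoop_4, pvAGroup_ws buf _ _ i3 h2]

-- ===== VERDICT (by name: the statement is the Claim_ definition above) =====
theorem skip_after_marker_py_spec : Claim_equal_skip_after_marker_py :=
  fun buf i _ _ => skip_eq buf i
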